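-- pv_equiv track=rewrite | github.com/19h/ida-structor | integration_tests/check_global_recovery_regressions.py | expand_function_filters
-- ===== SOURCE A (Python) =====
-- def expand_function_filters(functions: list[str]) -> list[str]:
--     expanded: list[str] = []
--     for name in functions:
--         if name not in expanded:
--             expanded.append(name)
--         if name and not name.startswith("_"):
--             prefixed = f"_{name}"
--             if prefixed not in expanded:
--                 expanded.append(prefixed)
--     return expanded
-- ===== SOURCE B (Python) =====
-- def expand_function_filters(functions: list[str]) -> list[str]:
--     # Flatten the candidate stream (each name followed by its underscore variant
--     # when applicable) in one comprehension.
--     pending = [c for name in functions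
--                  for c in ([name, "_" + name]
--                            if name and not name.startswith("_") else [name])]
--     # Dedup without any membership test against the output: repeatedly emit the
--     # head of the remaining stream and filter every later duplicate of it away.
--     out: list[str] = []
--     while pending:
--         head = pending[0]
--         out.append(head)
--         pending = [c for c in pending[1:] if c != head]
--     return out
-- ===== Notes on version B (the rewrite author's own statement) =====
-- stated objective: alternative
-- what changed: A dedups by scanning the growing output list for each generated candidate; B first flattens the whole candidate stream, then dedups it with no membership test at all, by repeatedly emitting the head and filtering all of its later duplicates out of the remaining stream.
import Mathlib
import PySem

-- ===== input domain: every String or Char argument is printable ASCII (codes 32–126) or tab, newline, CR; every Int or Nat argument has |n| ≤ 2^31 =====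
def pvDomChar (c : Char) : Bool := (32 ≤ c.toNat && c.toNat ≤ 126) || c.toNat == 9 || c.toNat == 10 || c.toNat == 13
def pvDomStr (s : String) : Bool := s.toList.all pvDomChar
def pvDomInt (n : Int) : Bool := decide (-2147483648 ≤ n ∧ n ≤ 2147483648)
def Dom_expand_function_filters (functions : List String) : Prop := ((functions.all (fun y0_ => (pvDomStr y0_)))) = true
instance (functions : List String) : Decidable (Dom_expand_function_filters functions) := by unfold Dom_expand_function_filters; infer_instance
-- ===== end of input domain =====

-- B flattens the candidate stream first, then dedups it with no membership test:
-- repeatedly emit the head and filter its later duplicates out of the remaining stream.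


-- ===== PORT A =====
def expand_function_filters (functions : List String) : List String :=
  functions.foldl (fun expanded name =>
    let expanded := if name ∈ expanded then expanded else expanded ++ [name]
    if name ≠ "" ∧ PySem.Str.startswith name "_" = false then
      let prefixed := "_" ++ name
      if prefixed ∈ expanded then expanded else expanded ++ [prefixed]
    else expanded) []

-- ===== PORT B =====
-- B's candidate comprehension
def efCandidates (functions : List String) : List String :=
  functions.flatMap (fun name =>
    if name ≠ "" ∧ PySem.Str.startswith name "_" = false then [name, "_" ++ name]
    else [name])

-- B's while loop: emit the head, drop its duplicates from the remaining stream
def efDedup : List String → List String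
  | [] => []
  | head :: rest => head :: efDedup (rest.filter (fun c => c ≠ head))
termination_by xs => xs.length
decreasing_by
  have h := List.length_filter_le (fun x => !decide ((x : {x // x ∈ rest}).val = head)) rest.attach
  simp at h ⊢; omega

def expand_function_filters_alt (functions : List String) : List String :=
  efDedup (efCandidates functions)

-- ===== PRECONDITION & SPEC =====
def Spec_expand_function_filters (functions : List String) (out : List String) : Prop := out = expand_function_filters_alt functions
instance (functions : List String) (out : List String) : Decidable (Spec_expand_function_filters functions out) := by unfold Spec_expand_function_filters; infer_instance

-- ===== CLAIM (what is proved, stated in full; the proofs are below) =====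
def Claim_equal_expand_function_filters : Prop := ∀ (functions : List String), Dom_expand_function_filters functions → Spec_expand_function_filters functions (expand_function_filters functions)

-- ===== LEMMAS AND PROOFS =====

-- the first-occurrence step A's loop reduces to
def dedupStep (acc : List String) (x : String) : List String :=
  if x ∈ acc then acc else acc ++ [x]

-- the candidates one name contributes
def cand (name : String) : List String :=
  if name ≠ "" ∧ PySem.Str.startswith name "_" = false then [name, "_" ++ name]
  else [name]

-- A's loop body = folding dedupStep over that name's candidates
lemma bodyA_eq (acc : List String) (name : String) :
    (let acc' := if name ∈ acc then acc else acc ++ [name]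
     if name ≠ "" ∧ PySem.Str.startswith name "_" = false then
       let prefixed := "_" ++ name
       if prefixed ∈ acc' then acc' else acc' ++ [prefixed]
     else acc') = (cand name).foldl dedupStep acc := by
  by_cases h : name ≠ "" ∧ PySem.Str.startswith name "_" = false
  · simp only [cand, if_pos h, dedupStep, List.foldl_cons, List.foldl_nil]
  · simp only [cand, if_neg h, dedupStep, List.foldl_cons, List.foldl_nil]

-- A = dedupStep folded over the flattened candidate stream
lemma A_eq_fold (functions : List String) (acc : List String) :
    functions.foldl (fun expanded name =>
      let expanded := if name ∈ expanded then expanded else expanded ++ [name]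
      if name ≠ "" ∧ PySem.Str.startswith name "_" = false then
        let prefixed := "_" ++ name
        if prefixed ∈ expanded then expanded else expanded ++ [prefixed]
      else expanded) acc
    = (functions.flatMap cand).foldl dedupStep acc := by
  induction functions generalizing acc with
  | nil => rfl
  | cons name rest ih =>
      simp only [List.foldl_cons, List.flatMap_cons, List.foldl_append]
      rw [← bodyA_eq acc name]
      exact ih _

-- folding dedupStep = filtering out acc's members, then head-emit/filter dedup
lemma fold_eq_efDedup (cs : List String) (acc : List String) :
    cs.foldl dedupStep acc = acc ++ efDedup (cs.filter (fun x => decide (x ∉ acc))) := by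
  induction cs generalizing acc with
  | nil => rw [List.filter_nil, efDedup]; simp
  | cons c rest ih =>
      by_cases h : c ∈ acc
      · have hstep : dedupStep acc c = acc := by simp [dedupStep, h]
        have hfil : (c :: rest).filter (fun x => decide (x ∉ acc))
            = rest.filter (fun x => decide (x ∉ acc)) := by simp [h]
        rw [List.foldl_cons, hstep, hfil, ih]
      · have hstep : dedupStep acc c = acc ++ [c] := by simp [dedupStep, h]
        have hfil : (c :: rest).filter (fun x => decide (x ∉ acc))
            = c :: rest.filter (fun x => decide (x ∉ acc)) := by simp [h]
        rw [List.foldl_cons, hstep, hfil, ih, efDedup, List.filter_filter]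
        simp only [List.append_assoc, List.cons_append, List.nil_append]
        congr 2
        congr 1
        apply List.filter_congr
        intro x _
        by_cases hx : x ∈ acc <;> by_cases he : x = c <;> simp [hx, he]

-- ===== VERDICT (by name: the statement is the Claim_ definition above) =====
theorem expand_function_filters_spec : Claim_equal_expand_function_filters := by
  intro functions _
  unfold Spec_expand_function_filters expand_function_filters expand_function_filters_alt efCandidates
  rw [A_eq_fold, fold_eq_efDedup]
  have : (List.flatMap cand functions).filter (fun x => decide (x ∉ ([] : List String)))
      = List.flatMap cand functions := by
    apply List.filter_eq_self.mpr; intro a _; simp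
  rw [this, List.nil_append]
  rfl
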